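-- pv_equiv track=rewrite | github.com/ameershalabi/RNG | casr/models/helper.py | bin_to_vhdl_hex
-- ===== SOURCE A (Python) =====
-- def bin_to_vhdl_hex(bin_list, width):
--     """
--     Convert a list of binary strings to VHDL-style hexadecimal literals.
--     """
--     if width <= 0:
--         raise ValueError("Width must be a positive integer")
--
--     hex_width = (width + 3) // 4  # number of hex digits
--
--     result = []
--     for b in bin_list:
--         if not set(b).issubset({"0", "1"}):
--             raise ValueError(f"Invalid binary string: {b}")
--
--         if len(b) > width:
--             raise ValueError(f"Binary string longer than width ({width}): {b}")
--
--         padded = b.zfill(width)                   # pad MSB side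
--         value = int(padded, 2)                    # binary → int
--         hex_digits = format(value, f"0{hex_width}X")  # leading zeros
--
--         result.append(f'x"{hex_digits}"')
--
--     return result
-- ===== SOURCE B (Python) =====
-- _NIBBLE = {
--     "0000": "0", "0001": "1", "0010": "2", "0011": "3",
--     "0100": "4", "0101": "5", "0110": "6", "0111": "7",
--     "1000": "8", "1001": "9", "1010": "A", "1011": "B",
--     "1100": "C", "1101": "D", "1110": "E", "1111": "F",
-- }
--
--
-- def bin_to_vhdl_hex(bin_list, width):
--     """
--     Convert a list of binary strings to VHDL-style hexadecimal literals.
--     """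
--     if width <= 0:
--         raise ValueError("Width must be a positive integer")
--
--     hex_width = (width + 3) // 4  # number of hex digits
--
--     result = []
--     for b in bin_list:
--         if not set(b).issubset({"0", "1"}):
--             raise ValueError(f"Invalid binary string: {b}")
--
--         if len(b) > width:
--             raise ValueError(f"Binary string longer than width ({width}): {b}")
--
--         bits = b.rjust(hex_width * 4, "0")        # pad to a whole number of nibbles
--         digits = "".join(_NIBBLE[bits[i:i + 4]] for i in range(0, len(bits), 4))
--         result.append(f'x"{digits}"')
--
--     return result
-- ===== Notes on version B (the rewrite author's own statement) =====
-- stated objective: idiomatic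
-- what changed: Replaces the int(padded,2) parse plus format(value,'0kX') re-serialisation by a precomputed nibble table: each string is left-padded to hex_width*4 bits and translated 4 bits at a time through the table, joined per string by a helper used in a list comprehension.
import Mathlib
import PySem

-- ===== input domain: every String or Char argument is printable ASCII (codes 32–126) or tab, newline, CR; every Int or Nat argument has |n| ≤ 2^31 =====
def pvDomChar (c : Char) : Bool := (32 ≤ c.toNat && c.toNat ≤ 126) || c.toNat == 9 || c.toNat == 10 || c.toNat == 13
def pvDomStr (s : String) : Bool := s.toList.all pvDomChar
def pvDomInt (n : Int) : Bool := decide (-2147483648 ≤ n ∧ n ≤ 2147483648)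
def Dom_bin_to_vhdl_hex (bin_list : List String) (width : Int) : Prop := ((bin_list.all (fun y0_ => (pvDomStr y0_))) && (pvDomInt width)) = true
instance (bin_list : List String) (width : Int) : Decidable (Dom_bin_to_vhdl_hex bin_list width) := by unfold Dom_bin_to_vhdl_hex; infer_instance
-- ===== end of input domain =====

-- B replaces int(padded, 2) + format(…, "0kX") by a nibble lookup table over 4-bit slices (objective: idiomatic/alternative, not faster).
-- Both programs raise on width ≤ 0, non-binary strings and over-long strings; Pre_ excludes exactly those inputs.

-- ===== PORT A =====
-- hex digit table of format(…, "X") (uppercase)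
def pvHexChar (d : Nat) : Char :=
  (['0','1','2','3','4','5','6','7','8','9','A','B','C','D','E','F']).getD d '0'

-- int(padded, 2): the value of a string of '0'/'1' chars (exact on such strings; Pre_ guarantees them)
def pvBinVal (cs : List Char) : Nat :=
  cs.foldl (fun acc c => 2 * acc + (if c = '1' then 1 else 0)) 0

-- hex digits of v, least significant first (empty for 0)
def pvHexRev (v : Nat) : List Char :=
  if h : v = 0 then [] else pvHexChar (v % 16) :: pvHexRev (v / 16)
  decreasing_by exact Nat.div_lt_self (Nat.pos_of_ne_zero h) (by omega)

-- format(v, f"0{k}X"): hex digits, left-padded with '0' to k digits (exact for v < 16^k; Pre_ guarantees it)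
def pvFormatHex (v k : Nat) : List Char :=
  List.replicate (k - (pvHexRev v).length) '0' ++ (pvHexRev v).reverse

def bin_to_vhdl_hex (bin_list : List String) (width : Int) : List String :=
  if width ≤ 0 then []  -- Python raises ValueError here; excluded by Pre_
  else
    let hex_width := (PySem.Int.floordiv (width + 3) 4).toNat
    bin_list.foldl (fun result b =>
      if (b.toList.all fun c => c == '0' || c == '1') = false then result  -- Python raises ValueError; excluded by Pre_
      else if width < PySem.Str.len b then result  -- Python raises ValueError; excluded by Pre_
      else
        let padded := PySem.Chars.zfill b.toList width
        let value := pvBinVal padded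
        result ++ [String.mk ('x' :: '"' :: (pvFormatHex value hex_width ++ ['"']))]) []

-- ===== PORT B =====
-- the _NIBBLE table: 4-bit group → hex digit (default branch unreachable on binary input; Python's dict would raise KeyError)
def pvNibble : Char → Char → Char → Char → Char
  | '0','0','0','0' => '0' | '0','0','0','1' => '1' | '0','0','1','0' => '2' | '0','0','1','1' => '3'
  | '0','1','0','0' => '4' | '0','1','0','1' => '5' | '0','1','1','0' => '6' | '0','1','1','1' => '7'
  | '1','0','0','0' => '8' | '1','0','0','1' => '9' | '1','0','1','0' => 'A' | '1','0','1','1' => 'B'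
  | '1','1','0','0' => 'C' | '1','1','0','1' => 'D' | '1','1','1','0' => 'E' | '1','1','1','1' => 'F'
  | _,_,_,_ => '?'

-- "".join(_NIBBLE[bits[i:i+4]] for i in range(0, len(bits), 4))
def pvNibbles : List Char → List Char
  | a :: b :: c :: d :: rest => pvNibble a b c d :: pvNibbles rest
  | _ => []

def pvConvert (b : String) (width : Int) (hex_width : Nat) : String :=
  if (b.toList.all fun c => c == '0' || c == '1') = false then ""  -- Python raises ValueError; excluded by Pre_
  else if width < PySem.Str.len b then ""  -- Python raises ValueError; excluded by Pre_
  else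
    let bits := List.replicate (4 * hex_width - b.toList.length) '0' ++ b.toList  -- b.rjust(hex_width*4, "0")
    String.mk ('x' :: '"' :: (pvNibbles bits ++ ['"']))

def bin_to_vhdl_hex_alt (bin_list : List String) (width : Int) : List String :=
  if width ≤ 0 then []  -- Python raises ValueError here; excluded by Pre_
  else bin_list.map (fun b => pvConvert b width ((PySem.Int.floordiv (width + 3) 4).toNat))

-- ===== PRECONDITION & SPEC =====
-- Pre_ excludes exactly the inputs where A (and B) raise ValueError: width ≤ 0, a string with a
-- character other than '0'/'1', or a string longer than width.
def Pre_bin_to_vhdl_hex (bin_list : List String) (width : Int) : Prop :=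
  0 < width ∧ ∀ b ∈ bin_list, (b.toList.all fun c => c == '0' || c == '1') = true ∧ PySem.Str.len b ≤ width
instance (bin_list : List String) (width : Int) : Decidable (Pre_bin_to_vhdl_hex bin_list width) := by
  unfold Pre_bin_to_vhdl_hex; infer_instance

def pvWitness_bin_to_vhdl_hex : List String × Int := (["101", ""], 5)

def Spec_bin_to_vhdl_hex (bin_list : List String) (width : Int) (out : List String) : Prop := out = bin_to_vhdl_hex_alt bin_list width
instance (bin_list : List String) (width : Int) (out : List String) : Decidable (Spec_bin_to_vhdl_hex bin_list width out) := by unfold Spec_bin_to_vhdl_hex; infer_instance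

-- ===== CLAIM (what is proved, stated in full; the proofs are below) =====
def Claim_equal_bin_to_vhdl_hex : Prop := ∀ (bin_list : List String) (width : Int), Dom_bin_to_vhdl_hex bin_list width → Pre_bin_to_vhdl_hex bin_list width → Spec_bin_to_vhdl_hex bin_list width (bin_to_vhdl_hex bin_list width)

-- ===== LEMMAS AND PROOFS =====

theorem pvBinVal_go (ys : List Char) (a : Nat) :
    ys.foldl (fun acc c => 2 * acc + (if c = '1' then 1 else 0)) a
      = a * 2 ^ ys.length + pvBinVal ys := by
  induction ys generalizing a with
  | nil => simp [pvBinVal]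
  | cons c ys ih =>
    simp only [List.foldl_cons, List.length_cons, pvBinVal]
    rw [ih, ih (2 * 0 + _)]
    ring

theorem pvBinVal_append (xs ys : List Char) :
    pvBinVal (xs ++ ys) = pvBinVal xs * 2 ^ ys.length + pvBinVal ys := by
  unfold pvBinVal
  rw [List.foldl_append, pvBinVal_go]
  rfl

theorem pvBinVal_replicate_zero (n : Nat) (s : List Char) :
    pvBinVal (List.replicate n '0' ++ s) = pvBinVal s := by
  rw [pvBinVal_append]
  have h0 : pvBinVal (List.replicate n '0') = 0 := by
    induction n with
    | zero => simp [pvBinVal]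
    | succ m ih => simpa [pvBinVal, List.replicate_succ, List.foldl_cons] using ih
  simp [h0]

theorem pvHexRev_step (q r : Nat) (hr : r < 16) (h : 16 * q + r ≠ 0) :
    pvHexRev (16 * q + r) = pvHexChar r :: pvHexRev q := by
  have hm : (16 * q + r) % 16 = r := by omega
  have hd : (16 * q + r) / 16 = q := by omega
  rw [pvHexRev, dif_neg h, hm, hd]

theorem pvFormatHex_step (q r k : Nat) (hr : r < 16) :
    pvFormatHex (16 * q + r) (k + 1) = pvFormatHex q k ++ [pvHexChar r] := by
  by_cases h : 16 * q + r = 0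
  · have hq : q = 0 := by omega
    have hr0 : r = 0 := by omega
    subst hq; subst hr0
    rw [pvFormatHex, pvFormatHex, pvHexRev]
    simp [List.replicate_succ' (n := k)]
    rfl
  · rw [pvFormatHex, pvFormatHex, pvHexRev_step q r hr h]
    have hl : (pvHexChar r :: pvHexRev q).length = (pvHexRev q).length + 1 := rfl
    rw [hl]
    simp [Nat.succ_sub_succ, List.append_assoc]

theorem pvNibbles_append (bits : List Char) (h : bits.length % 4 = 0) (a b c d : Char) :
    pvNibbles (bits ++ [a, b, c, d]) = pvNibbles bits ++ [pvNibble a b c d] := by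
  induction bits using pvNibbles.induct with
  | case1 x y z w rest ih =>
    simp only [List.cons_append, pvNibbles]
    rw [ih (by simp at h; omega)]
  | case2 bits hshape =>
    match bits, h, hshape with
    | [], _, _ => simp [pvNibbles]
    | [x], h, _ => simp at h
    | [x, y], h, _ => simp at h
    | [x, y, z], h, _ => simp at h
    | x :: y :: z :: w :: rest, _, hshape => exact (hshape x y z w rest rfl).elim

theorem pvNibble_val (a b c d : Char)
    (ha : a = '0' ∨ a = '1') (hb : b = '0' ∨ b = '1')
    (hc : c = '0' ∨ c = '1') (hd : d = '0' ∨ d = '1') :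
    pvNibble a b c d = pvHexChar (pvBinVal [a, b, c, d]) ∧ pvBinVal [a, b, c, d] < 16 := by
  rcases ha with rfl | rfl <;> rcases hb with rfl | rfl <;>
    rcases hc with rfl | rfl <;> rcases hd with rfl | rfl <;>
    exact ⟨rfl, by decide⟩

theorem pvMain (k : Nat) (bits : List Char) (hlen : bits.length = 4 * k)
    (hbin : ∀ c ∈ bits, c = '0' ∨ c = '1') :
    pvFormatHex (pvBinVal bits) k = pvNibbles bits := by
  induction k generalizing bits with
  | zero =>
    have : bits = [] := List.eq_nil_of_length_eq_zero (by omega)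
    subst this
    rw [show pvBinVal [] = 0 from rfl, pvFormatHex, pvHexRev]
    simp [pvNibbles]
  | succ k ih =>
    have hdec : bits = bits.take (4 * k) ++ bits.drop (4 * k) := (List.take_append_drop _ _).symm
    have hlt : (bits.take (4 * k)).length = 4 * k := by
      rw [List.length_take]; omega
    have hld : (bits.drop (4 * k)).length = 4 := by
      rw [List.length_drop]; omega
    obtain ⟨a, b, c, d, hsuf⟩ : ∃ a b c d, bits.drop (4 * k) = [a, b, c, d] := by
      rcases hsd : bits.drop (4 * k) with _ | ⟨a, _ | ⟨b, _ | ⟨c, _ | ⟨d, _ | ⟨e, t⟩⟩⟩⟩⟩ <;>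
        simp [hsd] at hld ⊢
    rw [hdec, hsuf]
    have hbin' : ∀ c' ∈ bits.take (4 * k), c' = '0' ∨ c' = '1' :=
      fun c' hc' => hbin c' (List.mem_of_mem_take hc')
    have hmem : ∀ x ∈ [a, b, c, d], x = '0' ∨ x = '1' := by
      intro x hx
      exact hbin x (by rw [hdec, hsuf]; exact List.mem_append_right _ hx)
    obtain ⟨hnib, hnlt⟩ := pvNibble_val a b c d
      (hmem a (by simp)) (hmem b (by simp)) (hmem c (by simp)) (hmem d (by simp))
    rw [pvBinVal_append]
    rw [show ([a, b, c, d] : List Char).length = 4 from rfl]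
    rw [show (2 : Nat) ^ 4 = 16 from rfl]
    rw [Nat.mul_comm (pvBinVal (List.take (4 * k) bits)) 16]
    rw [pvFormatHex_step _ _ _ hnlt, pvNibbles_append _ (by rw [hlt]; omega),
      ih _ hlt hbin', hnib]

-- per-string agreement under Pre_'s per-string conditions
theorem pvElem (b : String) (width : Int) (hw : 0 < width)
    (hbin : ∀ c ∈ b.toList, c = '0' ∨ c = '1') (hlen : PySem.Str.len b ≤ width) :
    String.mk ('x' :: '"' ::
        (pvFormatHex (pvBinVal (PySem.Chars.zfill b.toList width))
          ((PySem.Int.floordiv (width + 3) 4).toNat) ++ ['"']))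
      = pvConvert b width ((PySem.Int.floordiv (width + 3) 4).toNat) := by
  have hall : (b.toList.all fun c => c == '0' || c == '1') = true := by
    rw [List.all_eq_true]
    intro c hc
    rcases hbin c hc with rfl | rfl <;> simp
  have hlen' : (b.toList.length : Int) ≤ width := by
    have := PySem.Str.len_eq b
    omega
  -- the hex width as a Nat, and width ≤ 4 * hex_width
  have hfd : PySem.Int.floordiv (width + 3) 4 = (width + 3) / 4 :=
    PySem.Int.floordiv_eq_ediv_of_pos (by omega)
  set hwN := (PySem.Int.floordiv (width + 3) 4).toNat with hhwN
  have hwid : width ≤ 4 * (hwN : Int) := by rw [hhwN, hfd]; omega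
  -- zfill on a sign-free string is plain left padding
  have hzf : PySem.Chars.zfill b.toList width
      = List.replicate (width.toNat - b.toList.length) '0' ++ b.toList := by
    rw [PySem.Chars.zfill.eq_def]
    rcases hb : b.toList with _ | ⟨c, rest⟩
    · split_ifs with h₁ <;> simp_all
    · have hc : c = '0' ∨ c = '1' := hbin c (by rw [hb]; simp)
      have hcs : ¬ (c = '+' ∨ c = '-') := by rcases hc with rfl | rfl <;> decide
      split_ifs with h₁
      · have h0 : width.toNat - (rest.length + 1) = 0 := by simp at h₁; omega
        simp [h0]
      · simp [hcs]
  rw [pvConvert, hall]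
  simp only [Bool.true_eq_false, if_false]
  have hlen2 : ¬ width < PySem.Str.len b := by omega
  rw [if_neg hlen2]
  -- both pads carry the same value; B's pad has length exactly 4 * hwN
  have hvals : pvBinVal (PySem.Chars.zfill b.toList width) = pvBinVal b.toList := by
    rw [hzf, pvBinVal_replicate_zero]
  have hvalsB : pvBinVal (List.replicate (4 * hwN - b.toList.length) '0' ++ b.toList)
      = pvBinVal b.toList := pvBinVal_replicate_zero _ _
  have hlenB : (List.replicate (4 * hwN - b.toList.length) '0' ++ b.toList).length = 4 * hwN := by
    rw [List.length_append, List.length_replicate]; omega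
  have hbinB : ∀ c ∈ List.replicate (4 * hwN - b.toList.length) '0' ++ b.toList,
      c = '0' ∨ c = '1' := by
    intro c hc
    rcases List.mem_append.1 hc with h | h
    · left; exact List.eq_of_mem_replicate h
    · exact hbin c h
  rw [hvals, ← hvalsB, pvMain hwN _ hlenB hbinB]

-- ===== VERDICT (by name: the statement is the Claim_ definition above) =====
theorem bin_to_vhdl_hex_spec : Claim_equal_bin_to_vhdl_hex := by
  intro bin_list width _ hpre
  obtain ⟨hw, helems⟩ := hpre
  unfold Spec_bin_to_vhdl_hex bin_to_vhdl_hex bin_to_vhdl_hex_alt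
  rw [if_neg (by omega), if_neg (by omega)]
  -- loop invariant: A's foldl builds acc ++ map of B's per-string conversion
  suffices h : ∀ (l : List String), (∀ b ∈ l, (b.toList.all fun c => c == '0' || c == '1') = true ∧ PySem.Str.len b ≤ width) →
      ∀ acc : List String,
      l.foldl (fun result b =>
        if (b.toList.all fun c => c == '0' || c == '1') = false then result
        else if width < PySem.Str.len b then result
        else
          result ++ [String.mk ('x' :: '"' ::
            (pvFormatHex (pvBinVal (PySem.Chars.zfill b.toList width))
              ((PySem.Int.floordiv (width + 3) 4).toNat) ++ ['"']))]) acc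
      = acc ++ l.map (fun b => pvConvert b width ((PySem.Int.floordiv (width + 3) 4).toNat)) by
    simpa using h bin_list helems []
  intro l hl
  induction l with
  | nil => intro acc; simp
  | cons b t ih =>
    intro acc
    obtain ⟨hall, hblen⟩ := hl b (by simp)
    have hbbin : ∀ c ∈ b.toList, c = '0' ∨ c = '1' := by
      intro c hc
      have := List.all_eq_true.1 hall c hc
      simpa using this
    simp only [List.foldl_cons, List.map_cons, hall, Bool.true_eq_false, if_false,
      if_neg (show ¬ width < PySem.Str.len b by omega)]
    rw [ih (fun x hx => hl x (by simp [hx]))]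
    rw [pvElem b width hw hbbin hblen]
    simp
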